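-- pv_equiv track=rewrite | github.com/achneerov/Python-Password-Cracker | main.py | crack_password_superfast
-- ===== SOURCE A (Python) =====
-- import itertools
--
-- alphabet = (
--     "a", "b", "c", "d", "e", "f", "g", "h", "i", "j", "k", "l", "m", "n", "o",
--     "p", "q", "r", "s", "t", "u", "v", "w", "x", "y", "z", "0", "1", "2", "3",
--     "4", "5", "6", "7", "8", "9"
-- )
--
-- def guess_password(guess_password, real_password):
--     return guess_password == real_password
--
-- def crack_password_superfast(password):
--     length = 1
--     while True:
--         # itertools.product generates combinations more efficiently by directly creating tuples of characters.
--         # This avoids manually creating and managing an explicit list or deque, which would require additional memory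
--         # and time to construct, append, and pop elements.
--         for combo in itertools.product(alphabet, repeat=length):
--             # itertools.product works by producing combinations directly from the input iterable without storing them in memory
--             # at once. This makes it memory-efficient compared to storing intermediate lists or strings.
--             current_guess = ''.join(combo)  # Efficiently joins the tuple to form the guess string
--             if guess_password(current_guess, password):
--                 return current_guess
--         length += 1
-- ===== SOURCE B (Python) =====
-- alphabet = (
--     "a", "b", "c", "d", "e", "f", "g", "h", "i", "j", "k", "l", "m", "n", "o",
--     "p", "q", "r", "s", "t", "u", "v", "w", "x", "y", "z", "0", "1", "2", "3",
--     "4", "5", "6", "7", "8", "9"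
-- )
--
-- def crack_password_superfast(password):
--     # Single integer counter; candidate n is its bijective base-36 expansion
--     # over the alphabet (shortest-first, alphabet order), no length loop.
--     n = 1
--     while True:
--         digits = []
--         m = n
--         while m > 0:
--             m -= 1
--             digits.append(alphabet[m % 36])
--             m //= 36
--         guess = ''.join(reversed(digits))
--         if guess == password:
--             return guess
--         n += 1
-- ===== Notes on version B (the rewrite author's own statement) =====
-- stated objective: alternative
-- what changed: Replaces the length-by-length itertools.product enumeration (explicit length loop plus tuple generation and join) with a single integer counter decoded into its candidate string by bijective base-36 conversion, reproducing the same shortest-first alphabet-order enumeration.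
import Mathlib
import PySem

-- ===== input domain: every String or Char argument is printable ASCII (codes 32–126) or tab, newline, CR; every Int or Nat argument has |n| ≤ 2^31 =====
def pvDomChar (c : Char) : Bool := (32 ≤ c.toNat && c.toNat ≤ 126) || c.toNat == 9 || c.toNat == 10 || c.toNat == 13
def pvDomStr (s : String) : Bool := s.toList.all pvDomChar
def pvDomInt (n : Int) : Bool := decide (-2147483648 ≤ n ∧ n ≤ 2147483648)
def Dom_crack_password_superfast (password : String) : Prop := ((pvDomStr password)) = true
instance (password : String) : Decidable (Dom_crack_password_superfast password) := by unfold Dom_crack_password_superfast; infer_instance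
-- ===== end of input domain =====

-- B replaces the length-by-length itertools.product enumeration with a single
-- integer counter decoded in bijective base 36 (objective: alternative; same cost).
-- A diverges (infinite loop) off Pre_, so both ports carry a fuel guard that is
-- exhausted only outside Pre_; on Pre_ each port computes exactly what its Python computes.

-- ===== PORT A =====
def pvAlpha : List Char :=
  ['a','b','c','d','e','f','g','h','i','j','k','l','m','n','o','p','q','r','s','t','u','v','w','x','y','z','0','1','2','3','4','5','6','7','8','9']

-- itertools.product(alphabet, repeat=n), first factor varying slowest
def pvProd : Nat → List (List Char)
  | 0 => [[]]
  | n + 1 => pvAlpha.flatMap (fun c => (pvProd n).map (fun t => c :: t))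

def pvGuessPassword (guess real : String) : Bool := guess == real

-- the inner 'for combo in product(...)' loop: first matching join, if any
def pvFindA (password : String) : List (List Char) → Option String
  | [] => none
  | c :: rest =>
      let g := String.ofList c  -- ''.join(combo)
      if pvGuessPassword g password then some g else pvFindA password rest

-- the 'while True: ... length += 1' loop; fuel only caps the lengths tried
-- (A diverges outside Pre_, where the fuel runs out)
def pvLoopA (password : String) : Nat → Nat → String
  | _, 0 => ""
  | length, fuel + 1 =>
      match pvFindA password (pvProd length) with
      | some g => g
      | none => pvLoopA password (length + 1) fuel

def crack_password_superfast (password : String) : String :=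
  pvLoopA password 1 password.toList.length

-- ===== PORT B =====
-- inner 'while m > 0' loop of Source B: little-endian bijective base-36 digits of n
def pvDigits : Nat → List Char
  | 0 => []
  | m + 1 => pvAlpha.getD (m % 36) 'a' :: pvDigits (m / 36)
decreasing_by exact Nat.lt_succ_of_le (Nat.div_le_self _ _)

-- the 'while True: ... n += 1' loop of Source B; fuel exhausted only outside Pre_
def pvLoopB (password : String) : Nat → Nat → String
  | _, 0 => ""
  | n, fuel + 1 =>
      let g := String.ofList (pvDigits n).reverse  -- ''.join(reversed(digits))
      if g == password then g else pvLoopB password (n + 1) fuel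

def crack_password_superfast_alt (password : String) : String :=
  pvLoopB password 1 (36 ^ (password.toList.length + 1))

-- ===== PRECONDITION & SPEC =====
-- A loops forever exactly when the password is empty or contains a character
-- outside its 36-char alphabet; Pre_ excludes precisely those diverging inputs.
def Pre_crack_password_superfast (password : String) : Prop :=
  password.toList ≠ [] ∧ password.toList.all (fun c => pvAlpha.contains c) = true
instance (password : String) : Decidable (Pre_crack_password_superfast password) := by
  unfold Pre_crack_password_superfast; infer_instance

def pvWitness_crack_password_superfast : String := "ab9"

def Spec_crack_password_superfast (password : String) (out : String) : Prop := out = crack_password_superfast_alt password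
instance (password : String) (out : String) : Decidable (Spec_crack_password_superfast password out) := by unfold Spec_crack_password_superfast; infer_instance

-- ===== CLAIM (what is proved, stated in full; the proofs are below) =====
def Claim_equal_crack_password_superfast : Prop := ∀ (password : String), Dom_crack_password_superfast password → Pre_crack_password_superfast password → Spec_crack_password_superfast password (crack_password_superfast password)

-- ===== LEMMAS AND PROOFS =====

-- index of a character in the alphabet (proof-side only)
def pvIdx (c : Char) : Nat := pvAlpha.idxOf c

-- little-endian bijective base-36 value of a digit list (proof-side only)
def pvDecode : List Char → Nat
  | [] => 0
  | c :: t => (pvIdx c + 1) + 36 * pvDecode t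

lemma pvIdx_getD : ∀ i < 36, pvIdx (pvAlpha.getD i 'a') = i := by
  have hnd : pvAlpha.Nodup := by decide
  intro i hi
  have hlt : i < pvAlpha.length := by simpa [pvAlpha] using hi
  rw [List.getD_eq_getElem _ _ hlt]
  simpa [pvIdx] using hnd.idxOf_getElem ..

lemma pvAlpha_getD_idx : ∀ c ∈ pvAlpha, pvAlpha.getD (pvIdx c) 'a' = c ∧ pvIdx c < 36 := by
  intro c h
  have hlt : pvIdx c < pvAlpha.length := List.idxOf_lt_length_of_mem h
  refine ⟨?_, by simpa [pvAlpha] using hlt⟩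
  rw [List.getD_eq_getElem _ _ hlt]
  exact List.getElem_idxOf hlt

lemma pvDigits_decode : ∀ r : List Char, (∀ c ∈ r, c ∈ pvAlpha) → pvDigits (pvDecode r) = r := by
  intro r
  induction r with
  | nil => intro _; simp [pvDecode, pvDigits]
  | cons c t ih =>
      intro h
      obtain ⟨hc, hlt⟩ := pvAlpha_getD_idx c (h c (by simp))
      have hdec : pvDecode (c :: t) = (pvIdx c + 36 * pvDecode t) + 1 := by
        simp [pvDecode]; ring
      rw [hdec, pvDigits]
      have h1 : (pvIdx c + 36 * pvDecode t) % 36 = pvIdx c := by omega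
      have h2 : (pvIdx c + 36 * pvDecode t) / 36 = pvDecode t := by omega
      rw [h1, h2, hc, ih (fun x hx => h x (by simp [hx]))]

lemma pvDecode_digits : ∀ n : Nat, pvDecode (pvDigits n) = n := by
  intro n
  induction n using Nat.strong_induction_on with
  | _ n ih =>
    match n with
    | 0 => simp [pvDigits, pvDecode]
    | m + 1 =>
        rw [pvDigits, pvDecode, pvIdx_getD (m % 36) (Nat.mod_lt _ (by norm_num)),
            ih (m / 36) (Nat.lt_succ_of_le (Nat.div_le_self _ _))]
        omega

lemma pvDecode_le : ∀ r : List Char, (∀ c ∈ r, c ∈ pvAlpha) →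
    35 * pvDecode r + 36 ≤ 36 ^ (r.length + 1) := by
  intro r
  induction r with
  | nil => intro _; simp [pvDecode]
  | cons c t ih =>
      intro h
      have hv : pvIdx c + 1 ≤ 36 := by
        have := (pvAlpha_getD_idx c (h c (by simp))).2; omega
      have iht := ih (fun x hx => h x (by simp [hx]))
      simp only [pvDecode, List.length_cons, pow_succ]
      have : (36:ℕ) ^ (t.length + 1) = 36 ^ t.length * 36 := pow_succ 36 t.length
      nlinarith

lemma pvDecode_pos (c : Char) (t : List Char) : 1 ≤ pvDecode (c :: t) := by
  simp [pvDecode]; omega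

-- B's loop returns the password once the counter reaches its decode
lemma pvLoopB_eq (password : String) :
    ∀ fuel n, (∀ c ∈ password.toList, c ∈ pvAlpha) →
      n ≤ pvDecode password.toList.reverse →
      pvDecode password.toList.reverse < n + fuel →
      pvLoopB password n fuel = password := by
  intro fuel
  induction fuel with
  | zero => intro n _ h1 h2; omega
  | succ f ih =>
      intro n hal h1 h2
      rw [pvLoopB]
      by_cases hn : n = pvDecode password.toList.reverse
      · have hd : pvDigits n = password.toList.reverse := by
          rw [hn]; exact pvDigits_decode _ (by intro c hc; exact hal c (List.mem_reverse.mp hc))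
        have hg : String.ofList (pvDigits n).reverse = password :=
          String.ofList_eq.mpr (by rw [hd, List.reverse_reverse])
        simp [hg]
      · have hne : String.ofList (pvDigits n).reverse ≠ password := by
          intro he
          apply hn
          have hdig : pvDigits n = password.toList.reverse := by
            rw [← String.ofList_eq.mp he, List.reverse_reverse]
          rw [← pvDecode_digits n, hdig]
        simp only [beq_iff_eq, hne, if_false]
        exact ih (n + 1) hal (by omega) (by omega)

-- every element of pvProd n has length n
lemma pvProd_length : ∀ n, ∀ l ∈ pvProd n, l.length = n := by
  intro n
  induction n with
  | zero => intro l hl; simp [pvProd] at hl; simp [hl]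
  | succ m ih =>
      intro l hl
      simp only [pvProd, List.mem_flatMap, List.mem_map] at hl
      obtain ⟨c, _, t, ht, rfl⟩ := hl
      simp [ih t ht]

-- every all-alphabet list of length n is enumerated by pvProd n
lemma pvProd_complete : ∀ (l : List Char), (∀ c ∈ l, c ∈ pvAlpha) → l ∈ pvProd l.length := by
  intro l
  induction l with
  | nil => intro _; simp [pvProd]
  | cons c t ih =>
      intro h
      simp only [List.length_cons, pvProd, List.mem_flatMap, List.mem_map]
      exact ⟨c, h c (by simp), t, ih (fun x hx => h x (by simp [hx])), rfl⟩

lemma pvFindA_none (password : String) :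
    ∀ cands, (∀ l ∈ cands, String.ofList l ≠ password) → pvFindA password cands = none := by
  intro cands
  induction cands with
  | nil => intro _; rfl
  | cons c rest ih =>
      intro h
      rw [pvFindA]
      simp only [pvGuessPassword, beq_iff_eq, h c (by simp), if_false]
      exact ih (fun l hl => h l (by simp [hl]))

lemma pvFindA_found (password : String) :
    ∀ cands, (∃ l ∈ cands, String.ofList l = password) → pvFindA password cands = some password := by
  intro cands
  induction cands with
  | nil => intro h; simp at h
  | cons c rest ih =>
      intro ⟨l, hl, he⟩
      rw [pvFindA]
      by_cases hc : String.ofList c = password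
      · simp [pvGuessPassword, hc]
      · simp only [pvGuessPassword, beq_iff_eq, hc, if_false]
        apply ih
        rcases List.mem_cons.mp hl with rfl | hl'
        · exact absurd he hc
        · exact ⟨l, hl', he⟩

lemma pvLoopA_eq (password : String) (hal : ∀ c ∈ password.toList, c ∈ pvAlpha) :
    ∀ fuel length, length ≤ password.toList.length →
      password.toList.length < length + fuel →
      pvLoopA password length fuel = password := by
  intro fuel
  induction fuel with
  | zero => intro n h1 h2; omega
  | succ f ih =>
      intro length h1 h2
      rw [pvLoopA]
      by_cases hl : length = password.toList.length
      · have : pvFindA password (pvProd length) = some password := by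
          apply pvFindA_found
          refine ⟨password.toList, ?_, by simp⟩
          rw [hl]; exact pvProd_complete _ hal
        simp [this]
      · have : pvFindA password (pvProd length) = none := by
          apply pvFindA_none
          intro l hml he
          apply hl
          rw [← pvProd_length length l hml, String.ofList_eq.mp he]
        simp only [this]
        exact ih (length + 1) (by omega) (by omega)

-- ===== VERDICT (by name: the statement is the Claim_ definition above) =====
theorem crack_password_superfast_spec : Claim_equal_crack_password_superfast := by
  intro password _ hpre
  obtain ⟨hne, hal'⟩ := hpre
  have hal : ∀ c ∈ password.toList, c ∈ pvAlpha := by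
    simpa [List.all_eq_true] using hal'
  unfold Spec_crack_password_superfast
  have hL : 1 ≤ password.toList.length := by
    cases h : password.toList with
    | nil => exact absurd h hne
    | cons c t => simp

  have hA : crack_password_superfast password = password := by
    unfold crack_password_superfast
    exact pvLoopA_eq password hal _ 1 hL (by omega)
  have hd : pvDecode password.toList.reverse < 36 ^ (password.toList.length + 1) := by
    have := pvDecode_le password.toList.reverse
      (by intro c hc; exact hal c (List.mem_reverse.mp hc))
    simp only [List.length_reverse] at this
    omega
  have hd1 : 1 ≤ pvDecode password.toList.reverse := by
    cases h : password.toList.reverse with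
    | nil => exact absurd (by simpa using congrArg List.reverse h) hne
    | cons c t => exact pvDecode_pos c t
  have hB : crack_password_superfast_alt password = password := by
    unfold crack_password_superfast_alt
    exact pvLoopB_eq password _ 1 hal hd1 (by omega)
  rw [hA, hB]
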